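-- pv_equiv track=rewrite | github.com/girishpandit88/ai-newsroom-mcp-server | tools/tag_summarizer.py | _build_highlight
-- ===== SOURCE A (Python) =====
-- from typing import Dict, List, Optional
--
-- def _build_highlight(text: str, limit: int = 160) -> str:
--     words = text.split()
--     highlight: List[str] = []
--     length = 0
--
--     for word in words:
--         projected = length + (1 if highlight else 0) + len(word)
--         if projected > limit:
--             break
--         highlight.append(word)
--         length = projected
--
--     snippet = " ".join(highlight)
--     if snippet and len(snippet) < len(text):
--         return f"{snippet}..."
--     return snippet or text[:limit]
-- ===== SOURCE B (Python) =====
-- def _build_highlight(text: str, limit: int = 160) -> str: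
--     words = text.split()
--     # prefix-length table: cumulative[i] == len(" ".join(words[:i+1]))
--     cumulative = []
--     total = -1
--     for word in words:
--         total += 1 + len(word)
--         cumulative.append(total)
--     # the table is strictly increasing, so counting the fits gives the cut point
--     k = sum(1 for c in cumulative if c <= limit)
--     snippet = " ".join(words[:k])
--     if snippet and len(snippet) < len(text):
--         return snippet + "..."
--     return snippet or text[:limit]
-- ===== Notes on version B (the rewrite author's own statement) =====
-- stated objective: alternative
-- what changed: A's greedy loop with break and a conditional separator is replaced by building a branch-free prefix-length table (total starts at -1, each word adds 1+len), counting how many table entries fit within the limit (valid since the table is strictly increasing), and slicing the word list there.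
import Mathlib
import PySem

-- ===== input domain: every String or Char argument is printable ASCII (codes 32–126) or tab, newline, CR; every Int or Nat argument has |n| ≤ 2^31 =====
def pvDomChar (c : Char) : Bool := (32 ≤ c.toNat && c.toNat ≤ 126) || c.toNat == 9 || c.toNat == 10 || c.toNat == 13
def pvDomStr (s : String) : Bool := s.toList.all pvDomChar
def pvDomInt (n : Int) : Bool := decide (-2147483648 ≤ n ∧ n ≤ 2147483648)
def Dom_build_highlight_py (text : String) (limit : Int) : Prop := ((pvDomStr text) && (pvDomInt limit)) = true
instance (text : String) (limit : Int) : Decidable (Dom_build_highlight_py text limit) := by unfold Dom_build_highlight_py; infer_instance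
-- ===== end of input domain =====

-- B replaces A's greedy break-loop (conditional separator, growing highlight list) by a
-- branch-free prefix-length table plus a count of the entries that fit; objective: alternative.

-- ===== PORT A =====
-- the for-loop with break: state (highlight, length)
def pvALoop (limit : Int) : List String → List String → Int → List String
  | [], highlight, _ => highlight
  | word :: ws, highlight, length =>
    if limit < length + (if highlight.isEmpty then 0 else 1) + PySem.Str.len word then highlight
    else pvALoop limit ws (highlight ++ [word])
      (length + (if highlight.isEmpty then 0 else 1) + PySem.Str.len word)

def build_highlight_py (text : String) (limit : Int) : String :=
  let words := PySem.Str.split₀ text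
  let highlight := pvALoop limit words [] 0
  let snippet := PySem.Str.join " " highlight
  if snippet ≠ "" ∧ PySem.Str.len snippet < PySem.Str.len text then snippet ++ "..."
  else if snippet ≠ "" then snippet
  else PySem.Str.slice text none (some limit)

-- ===== PORT B =====
-- loop body: total += 1 + len(word); cumulative.append(total)
def pvBStep (acc : Int × List Int) (word : String) : Int × List Int :=
  (acc.1 + 1 + PySem.Str.len word, acc.2 ++ [acc.1 + 1 + PySem.Str.len word])

def build_highlight_py_alt (text : String) (limit : Int) : String :=
  let words := PySem.Str.split₀ text
  let cumulative := (words.foldl pvBStep ((-1 : Int), ([] : List Int))).2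
  -- k = sum(1 for c in cumulative if c <= limit)
  let k : Int := (cumulative.countP (fun c => decide (c ≤ limit)) : Nat)
  let snippet := PySem.Str.join " " (PySem.List.slice words none (some k))
  if snippet ≠ "" ∧ PySem.Str.len snippet < PySem.Str.len text then snippet ++ "..."
  else if snippet ≠ "" then snippet
  else PySem.Str.slice text none (some limit)

-- ===== PRECONDITION & SPEC =====
def Spec_build_highlight_py (text : String) (limit : Int) (out : String) : Prop := out = build_highlight_py_alt text limit
instance (text : String) (limit : Int) (out : String) : Decidable (Spec_build_highlight_py text limit out) := by unfold Spec_build_highlight_py; infer_instance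

-- ===== CLAIM (what is proved, stated in full; the proofs are below) =====
def Claim_equal_build_highlight_py : Prop := ∀ (text : String) (limit : Int), Dom_build_highlight_py text limit → Spec_build_highlight_py text limit (build_highlight_py text limit)

-- ===== LEMMAS AND PROOFS =====

-- reference cumulative table of B's loop, as a recursion
def pvCums (base : Int) : List String → List Int
  | [] => []
  | w :: ws => (base + 1 + PySem.Str.len w) :: pvCums (base + 1 + PySem.Str.len w) ws

-- number of words A's greedy loop keeps, read off the same table
def pvFits (limit base : Int) : List String → Nat
  | [] => 0
  | w :: ws =>
    if limit < base + 1 + PySem.Str.len w then 0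
    else pvFits limit (base + 1 + PySem.Str.len w) ws + 1

lemma pvBLoop_eq (ws : List String) (total : Int) (acc : List Int) :
    (ws.foldl pvBStep (total, acc)).2 = acc ++ pvCums total ws := by
  induction ws generalizing total acc with
  | nil => simp [pvCums]
  | cons w ws ih => simp [pvCums, pvBStep, ih]

lemma pvStrLen_nonneg (s : String) : (0:Int) ≤ PySem.Str.len s := by
  simp [PySem.Str.len]

lemma pvCums_lb (ws : List String) (base : Int) :
    ∀ x ∈ pvCums base ws, base + 1 ≤ x := by
  induction ws generalizing base with
  | nil => simp [pvCums]
  | cons w ws ih =>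
    intro x hx
    have hw := pvStrLen_nonneg w
    simp only [pvCums, List.mem_cons] at hx
    rcases hx with rfl | hx
    · omega
    · have := ih (base + 1 + PySem.Str.len w) x hx; omega

lemma pvCount_eq_fits (limit : Int) (ws : List String) (base : Int) :
    (pvCums base ws).countP (fun c => decide (c ≤ limit)) = pvFits limit base ws := by
  induction ws generalizing base with
  | nil => simp [pvCums, pvFits]
  | cons w ws ih =>
    rw [pvCums, pvFits, List.countP_cons]
    by_cases h : limit < base + 1 + PySem.Str.len w
    · have hz : (pvCums (base + 1 + PySem.Str.len w) ws).countP (fun c => decide (c ≤ limit)) = 0 := by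
        rw [List.countP_eq_zero]
        intro x hx
        have := pvCums_lb ws (base + 1 + PySem.Str.len w) x hx
        simp only [decide_eq_true_eq]; omega
      rw [hz, if_pos h, if_neg (by simp only [decide_eq_true_eq]; omega)]
    · rw [ih, if_neg h, if_pos (by simp only [decide_eq_true_eq]; omega)]

lemma pvALoop_eq (limit : Int) (ws : List String) :
    ∀ (h : List String) (len base : Int),
      len + (if h.isEmpty then 0 else 1) = base + 1 →
      pvALoop limit ws h len = h ++ ws.take (pvFits limit base ws) := by
  induction ws with
  | nil => intro h len base _; simp [pvALoop, pvFits]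
  | cons w ws ih =>
    intro h len base hlen
    rw [pvALoop, pvFits]
    have hp : len + (if h.isEmpty then 0 else 1) + PySem.Str.len w
        = base + 1 + PySem.Str.len w := by omega
    rw [hp]
    by_cases hb : limit < base + 1 + PySem.Str.len w
    · rw [if_pos hb, if_pos hb]; simp
    · rw [if_neg hb, if_neg hb,
        ih (h ++ [w]) (base + 1 + PySem.Str.len w) (base + 1 + PySem.Str.len w) (by simp)]
      simp [List.take_succ_cons]

lemma pvALoop_start (limit : Int) (ws : List String) :
    pvALoop limit ws [] 0 = ws.take (pvFits limit (-1) ws) := by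
  rw [pvALoop_eq limit ws [] 0 (-1) (by simp)]
  simp

-- ===== VERDICT (by name: the statement is the Claim_ definition above) =====
theorem build_highlight_py_spec : Claim_equal_build_highlight_py := by
  intro text limit _
  unfold Spec_build_highlight_py build_highlight_py build_highlight_py_alt
  simp only [pvBLoop_eq, List.nil_append, pvCount_eq_fits, pvALoop_start,
    PySem.List.slice_to_natCast]
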